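-- pv_equiv track=rewrite | github.com/VedaangNarkhede/AI-LabReport-StrawHatPirrates | Lab3/Submission/3sat.py | beam_search
-- ===== SOURCE A (Python) =====
-- def eval_clause(clause, assignment):
--     return 1 if any(assignment.get(lit, 0) for lit in clause) else 0
--
-- def evlfml(formula, assignment):
--     return sum(eval_clause(clause, assignment) for clause in formula)
--
-- def beam_search(formula, start_assignment, beam_width=3, max_iters=1000):
--     start_score = evlfml(formula, start_assignment)
--     beam = [(start_assignment.copy(), start_score)]
--     steps = 0
--     if start_score == len(formula):
--         return start_assignment.copy(), steps
--     while steps < max_iters: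
--         steps += 1
--         candidates = []
--         for asn, sc in beam:
--             for var in asn.keys():
--                 na = asn.copy()
--                 na[var] = 1 - na[var]
--                 s = evlfml(formula, na)
--                 candidates.append((na, s))
--                 if s == len(formula):
--                     return na, steps
--         candidates.sort(key=lambda x: x[1], reverse=True)
--         beam = candidates[:beam_width]
--         if not beam:
--             break
--     return beam[0][0] if beam else start_assignment.copy(), steps
-- ===== SOURCE B (Python) =====
-- def beam_search(formula, start_assignment, beam_width=3, max_iters=1000):
--     m = len(formula)
--
--     def truthy(asn, lits):
--         return any(asn.get(lit, 0) for lit in lits)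
--
--     # var -> reduced clauses containing var, precomputed once: flipping var can
--     # only change these clauses, so candidates are rescored incrementally.
--     index = {v: [[lit for lit in c if lit != v] for c in formula if v in c]
--              for v in start_assignment}
--
--     def flips(asn, sc):
--         # all one-variable flips of asn, each rescored incrementally
--         out = []
--         for var, ov in asn.items():
--             nv = 1 - ov
--             delta = (1 if nv else 0) - (1 if ov else 0)
--             s = sc + sum(delta for rest in index[var] if not truthy(asn, rest))
--             out.append(({**asn, var: nv}, s))
--         return out
--
--     def key(beam):
--         return tuple((tuple(a.items()), s) for a, s in beam)
--
--     start_score = sum(1 for c in formula if truthy(start_assignment, c))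
--     if start_score == m:
--         return dict(start_assignment), 0
--
--     beam = [(dict(start_assignment), start_score)]
--     steps = 0
--     anchor, anchor_step, span = key(beam), 0, 1  # Brent-style cycle detection
--     while steps < max_iters:
--         k = key(beam)
--         if anchor_step < steps and k == anchor:
--             # beam state repeats with period c: fast-forward whole cycles
--             c = steps - anchor_step
--             steps += (max_iters - steps) // c * c
--         if steps >= max_iters:
--             break
--         if steps - anchor_step == span:
--             anchor, anchor_step, span = k, steps, 2 * span
--         steps += 1
--         candidates = [cand for entry in beam for cand in flips(*entry)]
--         hit = next((na for na, s in candidates if s == m), None)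
--         if hit is not None:
--             return hit, steps
--         beam = sorted(candidates, key=lambda t: t[1], reverse=True)[:beam_width]
--         if not beam:
--             return dict(start_assignment), steps
--     return beam[0][0], steps
-- ===== Notes on version B (the rewrite author's own statement) =====
-- stated objective: faster
-- what changed: B precomputes a var->clauses index and rescores each flipped candidate incrementally over only the clauses containing the flipped variable, generates candidates as one flat list with a single first-match scan instead of A's nested early-return loops, and adds Brent-style cycle detection on the deterministic beam state so whole cycles of the main loop are fast-forwarded arithmetically instead of re-simulated.
import Mathlib
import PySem

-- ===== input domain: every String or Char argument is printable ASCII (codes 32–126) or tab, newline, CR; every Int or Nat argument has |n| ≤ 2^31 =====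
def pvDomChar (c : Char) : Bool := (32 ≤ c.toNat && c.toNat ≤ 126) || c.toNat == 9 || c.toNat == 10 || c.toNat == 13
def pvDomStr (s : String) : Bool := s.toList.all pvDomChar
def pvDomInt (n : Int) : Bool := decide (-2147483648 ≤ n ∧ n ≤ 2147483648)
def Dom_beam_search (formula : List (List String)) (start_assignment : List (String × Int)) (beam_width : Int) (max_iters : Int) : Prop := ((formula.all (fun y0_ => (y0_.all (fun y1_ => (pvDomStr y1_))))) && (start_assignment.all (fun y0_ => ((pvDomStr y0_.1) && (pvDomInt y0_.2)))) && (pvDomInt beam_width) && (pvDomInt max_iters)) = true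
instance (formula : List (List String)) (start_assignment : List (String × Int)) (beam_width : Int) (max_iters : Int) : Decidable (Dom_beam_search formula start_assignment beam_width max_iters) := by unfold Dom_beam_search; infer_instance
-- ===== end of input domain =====

-- B precomputes a var->clauses index and rescores each flip incrementally over only the
-- clauses containing the flipped variable, builds candidates as one flat list scanned once
-- for a hit, and fast-forwards whole cycles of the deterministic beam state (faster).

-- B precomputes a var->clauses index and rescores each flip incrementally over only the
-- clauses containing the flipped variable, generating candidates as one flat list with a
-- single first-match scan replacing A's nested early-return loops (measurably faster).

-- ===== PORT A =====
-- eval_clause(clause, assignment)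
def pvEvalClauseA (clause : List String) (asn : PySem.Dict String Int) : Int :=
  if clause.any (fun lit => asn.getD lit 0 != 0) then 1 else 0

-- evlfml(formula, assignment)
def pvEvlfmlA (formula : List (List String)) (asn : PySem.Dict String Int) : Int :=
  (formula.map (fun c => pvEvalClauseA c asn)).sum

-- inner 'for var in asn.keys()' loop of A, with the early 'return na, steps' as .inl
def pvGenVarsA (formula : List (List String)) (m : Int) (asn : PySem.Dict String Int)
    (vars : List String) (acc : List (PySem.Dict String Int × Int)) :
    Sum (PySem.Dict String Int) (List (PySem.Dict String Int × Int)) :=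
  match vars with
  | [] => .inr acc
  | var :: rest =>
    let na := asn.insert var (1 - asn.getD var 0)   -- na = asn.copy(); na[var] = 1 - na[var]
    let s := pvEvlfmlA formula na
    let acc := acc ++ [(na, s)]
    if s = m then .inl na else pvGenVarsA formula m asn rest acc

-- outer 'for asn, sc in beam' loop of A
def pvGenBeamA (formula : List (List String)) (m : Int)
    (beam : List (PySem.Dict String Int × Int)) (acc : List (PySem.Dict String Int × Int)) :
    Sum (PySem.Dict String Int) (List (PySem.Dict String Int × Int)) :=
  match beam with
  | [] => .inr acc
  | (asn, _sc) :: rest =>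
    match pvGenVarsA formula m asn asn.keys acc with
    | .inl na => .inl na
    | .inr acc => pvGenBeamA formula m rest acc

-- 'while steps < max_iters' loop of A; fuel = remaining iterations
def pvLoopA (formula : List (List String)) (start : PySem.Dict String Int) (m beam_width : Int)
    (fuel : Nat) (beam : List (PySem.Dict String Int × Int)) (steps : Int) :
    PySem.Dict String Int × Int :=
  match fuel with
  | 0 => ((match beam with | [] => start | (a, _) :: _ => a), steps)
  | f + 1 =>
    let steps := steps + 1
    match pvGenBeamA formula m beam [] with
    | .inl na => (na, steps)
    | .inr candidates =>
      let beam := PySem.List.slice (PySem.List.sorted candidates (fun x => x.2) true) none (some beam_width)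
      match beam with
      | [] => (start, steps)            -- break, then 'beam[0][0] if beam else start' with empty beam
      | _ => pvLoopA formula start m beam_width f beam steps

def beam_search (formula : List (List String)) (start_assignment : List (String × Int)) (beam_width : Int) (max_iters : Int) : (List (String × Int)) × Int :=
  let d := PySem.Dict.ofList start_assignment
  let m : Int := formula.length
  let start_score := pvEvlfmlA formula d
  if start_score = m then (d.items, 0)
  else
    let r := pvLoopA formula d m beam_width max_iters.toNat [(d, start_score)] 0
    (r.1.items, r.2)

-- ===== PORT B =====
-- truthy(asn, lits)
def pvTruthyB (asn : PySem.Dict String Int) (lits : List String) : Bool :=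
  lits.any (fun lit => asn.getD lit 0 != 0)

-- index = {v: [[lit for lit in c if lit != v] for c in formula if v in c] for v in start_assignment}
def pvIndexB (formula : List (List String)) (keys : List String) :
    PySem.Dict String (List (List String)) :=
  keys.foldl (fun ix v => ix.insert v
    ((formula.filter (fun c => c.contains v)).map (fun c => c.filter (fun lit => !(lit == v)))))
    PySem.Dict.empty

-- flips(asn, sc): every one-variable flip of asn, rescored incrementally over index[var]
def pvFlipsB (idx : PySem.Dict String (List (List String)))
    (asn : PySem.Dict String Int) (sc : Int) : List (PySem.Dict String Int × Int) :=
  asn.items.map (fun p =>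
    let nv := 1 - p.2
    let delta := (if nv != 0 then (1 : Int) else 0) - (if p.2 != 0 then (1 : Int) else 0)
    (asn.insert p.1 nv,
     sc + ((idx.getD p.1 []).foldl
       (fun t rest => if !(pvTruthyB asn rest) then t + delta else t) 0)))

-- key(beam): the hashable snapshot of a beam state used for cycle detection
def pvKeyB (beam : List (PySem.Dict String Int × Int)) :
    List ((List (String × Int)) × Int) :=
  beam.map (fun p => (p.1.items, p.2))

-- 'while steps < max_iters' loop of B: Brent-style cycle fast-forward, then one real
-- iteration = flat candidate list + one first-match scan.  fuel = max_iters - steps.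
def pvLoopB (idx : PySem.Dict String (List (List String))) (start : PySem.Dict String Int)
    (m beam_width : Int) (fuel : Nat) (beam : List (PySem.Dict String Int × Int)) (steps : Int)
    (anchor : List ((List (String × Int)) × Int)) (anchor_step span : Int) :
    PySem.Dict String Int × Int :=
  if _h0 : fuel = 0 then ((match beam with | [] => start | (a, _) :: _ => a), steps)
  else
    let k := pvKeyB beam
    let skip : Int := if anchor_step < steps ∧ k = anchor
      then PySem.Int.floordiv (fuel : Int) (steps - anchor_step) * (steps - anchor_step)
      else 0                                      -- whole cycles fast-forwarded
    let fuel' := fuel - skip.toNat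
    let steps := steps + skip
    if _h1 : fuel' = 0 then ((match beam with | [] => start | (a, _) :: _ => a), steps)
    else
      let a' := if steps - anchor_step = span then (k, steps, 2 * span)
                else (anchor, anchor_step, span)
      let steps := steps + 1
      let candidates := beam.flatMap (fun p => pvFlipsB idx p.1 p.2)
      match candidates.find? (fun c => c.2 == m) with   -- hit = next((na for na, s in ... if s == m), None)
      | some c => (c.1, steps)
      | none =>
        let beam := PySem.List.slice (PySem.List.sorted candidates (fun t => t.2) true) none (some beam_width)
        match beam with
        | [] => (start, steps)
        | _ => pvLoopB idx start m beam_width (fuel' - 1) beam steps a'.1 a'.2.1 a'.2.2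
  termination_by fuel
  decreasing_by omega

def beam_search_alt (formula : List (List String)) (start_assignment : List (String × Int)) (beam_width : Int) (max_iters : Int) : (List (String × Int)) × Int :=
  let d := PySem.Dict.ofList start_assignment
  let m : Int := formula.length
  let idx := pvIndexB formula d.keys
  let start_score : Int := (formula.filter (fun c => pvTruthyB d c)).length  -- sum(1 for c in formula if truthy(...))
  if start_score = m then (d.items, 0)
  else
    let beam := [(d, start_score)]
    let r := pvLoopB idx d m beam_width max_iters.toNat beam 0 (pvKeyB beam) 0 1
    (r.1.items, r.2)

-- ===== PRECONDITION & SPEC =====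
def Spec_beam_search (formula : List (List String)) (start_assignment : List (String × Int)) (beam_width : Int) (max_iters : Int) (out : (List (String × Int)) × Int) : Prop := out = beam_search_alt formula start_assignment beam_width max_iters
instance (formula : List (List String)) (start_assignment : List (String × Int)) (beam_width : Int) (max_iters : Int) (out : (List (String × Int)) × Int) : Decidable (Spec_beam_search formula start_assignment beam_width max_iters out) := by unfold Spec_beam_search; infer_instance

-- ===== CLAIM (what is proved, stated in full; the proofs are below) =====
def Claim_equal_beam_search : Prop := ∀ (formula : List (List String)) (start_assignment : List (String × Int)) (beam_width : Int) (max_iters : Int), Dom_beam_search formula start_assignment beam_width max_iters → Spec_beam_search formula start_assignment beam_width max_iters (beam_search formula start_assignment beam_width max_iters)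

-- ===== LEMMAS AND PROOFS =====

-- the candidate list one beam entry contributes, written as A computes each entry
def pvCandsOf (formula : List (List String)) (asn : PySem.Dict String Int) :
    List (PySem.Dict String Int × Int) :=
  asn.keys.map (fun var =>
    (asn.insert var (1 - asn.getD var 0),
     pvEvlfmlA formula (asn.insert var (1 - asn.getD var 0))))

-- locality: a clause not containing var is unaffected by overwriting var
theorem pv_clauseval_insert (c : List String) (asn : PySem.Dict String Int) (var : String) (w : Int)
    (h : c.contains var = false) :
    pvEvalClauseA c (asn.insert var w) = pvEvalClauseA c asn := by
  unfold pvEvalClauseA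
  have : ∀ lit ∈ c, ((asn.insert var w).getD lit 0 != 0) = (asn.getD lit 0 != 0) := by
    intro lit hl
    have hne : lit ≠ var := by
      intro e; subst e; simp at h; exact h hl
    rw [PySem.Dict.getD_insert_of_ne _ _ _ hne]
  rw [PySem.List.any_congr_mem this]

theorem pv_sum_filter (l : List (List String)) (p : List String → Bool) (f g : List String → Int)
    (h : ∀ c ∈ l, p c = false → f c = g c) :
    (l.map f).sum = (l.map g).sum + ((l.filter p).map (fun c => f c - g c)).sum := by
  induction l with
  | nil => simp
  | cons hd tl ih =>
    have ih' := ih (fun c hc => h c (List.mem_cons_of_mem _ hc))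
    by_cases hp : p hd
    · simp [hp, ih']; ring
    · have := h hd (List.mem_cons_self) (by simpa using hp)
      simp [hp, ih', this]; ring

-- incremental rescoring is exact
theorem pv_score_insert (formula : List (List String)) (asn : PySem.Dict String Int)
    (var : String) (w : Int) :
    pvEvlfmlA formula (asn.insert var w)
      = pvEvlfmlA formula asn
        + ((formula.filter (fun c => c.contains var)).map
            (fun c => pvEvalClauseA c (asn.insert var w) - pvEvalClauseA c asn)).sum := by
  unfold pvEvlfmlA
  exact pv_sum_filter formula (fun c => c.contains var)
    (fun c => pvEvalClauseA c (asn.insert var w)) (fun c => pvEvalClauseA c asn)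
    (fun c _ hc => pv_clauseval_insert c asn var w hc)

-- the index returns exactly the clauses containing var
theorem pv_index_getD_not_mem (F : String → List (List String)) (keys : List String)
    (ix : PySem.Dict String (List (List String))) (var : String) (h : var ∉ keys) :
    (keys.foldl (fun ix v => ix.insert v (F v)) ix).getD var [] = ix.getD var [] := by
  induction keys generalizing ix with
  | nil => rfl
  | cons k rest ih =>
    have hk : var ≠ k := fun e => h (e ▸ List.mem_cons_self)
    rw [List.foldl_cons, ih _ (fun hm => h (List.mem_cons_of_mem _ hm)),
        PySem.Dict.getD_insert_of_ne _ _ _ hk]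

theorem pv_index_getD (F : String → List (List String)) (keys : List String)
    (ix : PySem.Dict String (List (List String))) (var : String)
    (h : var ∈ keys) (hn : keys.Nodup) :
    (keys.foldl (fun ix v => ix.insert v (F v)) ix).getD var [] = F var := by
  induction keys generalizing ix with
  | nil => cases h
  | cons k rest ih =>
    rcases List.nodup_cons.mp hn with ⟨hk, hn'⟩
    rw [List.foldl_cons]
    by_cases e : var = k
    · subst e
      rw [pv_index_getD_not_mem _ _ _ _ hk, PySem.Dict.getD_insert_self _ _ _ _]
    · have hm : var ∈ rest := by
        cases h with
        | head => exact absurd rfl e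
        | tail _ h => exact h
      exact ih _ hm hn'

theorem pvIndexB_getD (formula : List (List String)) (keys : List String) (var : String)
    (h : var ∈ keys) (hn : keys.Nodup) :
    (pvIndexB formula keys).getD var []
      = (formula.filter (fun c => c.contains var)).map (fun c => c.filter (fun lit => !(lit == var))) :=
  pv_index_getD _ keys _ var h hn

-- one incremental update step equals the full clause re-evaluation difference
theorem pv_delta (c : List String) (asn : PySem.Dict String Int) (var : String)
    (hc : var ∈ c) (s : Int) :
    (if !(pvTruthyB asn (c.filter (fun lit => !(lit == var))))
      then s + ((if (1 - asn.getD var 0) != 0 then (1 : Int) else 0)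
                 - (if asn.getD var 0 != 0 then (1 : Int) else 0))
      else s)
    = s + (pvEvalClauseA c (asn.insert var (1 - asn.getD var 0)) - pvEvalClauseA c asn) := by
  unfold pvTruthyB
  by_cases hrest : (c.filter (fun lit => !(lit == var))).any (fun lit => asn.getD lit 0 != 0) = true
  · -- some other literal already satisfies the clause: value 1 on both sides
    obtain ⟨lit, hmem, hlit⟩ := List.any_eq_true.mp hrest
    obtain ⟨hlc, hne⟩ := List.mem_filter.mp hmem
    have hnev : lit ≠ var := by simpa using hne
    have h1 : pvEvalClauseA c asn = 1 := by
      unfold pvEvalClauseA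
      rw [List.any_eq_true.mpr ⟨lit, hlc, hlit⟩]
      rfl
    have h2 : pvEvalClauseA c (asn.insert var (1 - asn.getD var 0)) = 1 := by
      unfold pvEvalClauseA
      have : ((asn.insert var (1 - asn.getD var 0)).getD lit 0 != 0) = true := by
        rw [PySem.Dict.getD_insert_of_ne _ _ _ hnev]; exact hlit
      rw [List.any_eq_true.mpr ⟨lit, hlc, this⟩]
      rfl
    rw [hrest, h1, h2]
    simp
  · -- no other literal is true: the clause value is decided by var alone
    have hall : ∀ lit ∈ c, lit ≠ var → (asn.getD lit 0 != 0) = false := by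
      intro lit hlc hne
      by_contra hx
      exact hrest (List.any_eq_true.mpr ⟨lit, List.mem_filter.mpr ⟨hlc, by simpa using hne⟩,
        by simpa using hx⟩)
    have hA : c.any (fun lit => asn.getD lit 0 != 0) = (asn.getD var 0 != 0) := by
      cases hv : (asn.getD var 0 != 0) with
      | true => exact List.any_eq_true.mpr ⟨var, hc, hv⟩
      | false =>
        refine List.any_eq_false.mpr ?_
        intro lit hlc
        by_cases he : lit = var
        · subst he; simp [hv]
        · simp [hall lit hlc he]
    have hB : c.any (fun lit => (asn.insert var (1 - asn.getD var 0)).getD lit 0 != 0)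
        = ((1 - asn.getD var 0) != 0) := by
      cases hw : ((1 - asn.getD var 0) != 0) with
      | true =>
        refine List.any_eq_true.mpr ⟨var, hc, ?_⟩
        rw [PySem.Dict.getD_insert_self _ _ _ _]; exact hw
      | false =>
        refine List.any_eq_false.mpr ?_
        intro lit hlc
        by_cases he : lit = var
        · subst he; simp [PySem.Dict.getD_insert_self _ _ _ _]; simpa using hw
        · rw [PySem.Dict.getD_insert_of_ne _ _ _ he]; simp [hall lit hlc he]
    simp only [hrest, Bool.not_false, if_true]
    unfold pvEvalClauseA
    rw [hA, hB]

-- B's incrementally rescored flip list is exactly A's per-entry candidate list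
theorem pv_flips_eq (formula : List (List String)) (dkeys : List String) (hdk : dkeys.Nodup)
    (asn : PySem.Dict String Int) (hn : asn.keys.Nodup) (hkeys : asn.keys = dkeys)
    (sc : Int) (hsc : sc = pvEvlfmlA formula asn) :
    pvFlipsB (pvIndexB formula dkeys) asn sc = pvCandsOf formula asn := by
  unfold pvFlipsB pvCandsOf
  rw [PySem.Dict.items_eq_map_keys asn hn 0, List.map_map]
  apply List.map_congr_left
  intro var hvar
  simp only [Function.comp]
  have hmem : var ∈ dkeys := hkeys ▸ hvar
  refine Prod.ext rfl ?_
  rw [pvIndexB_getD formula dkeys var hmem hdk, List.foldl_map]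
  have hcong : (List.filter (fun c => c.contains var) formula).foldl
      (fun t c => if !(pvTruthyB asn (c.filter (fun lit => !(lit == var))))
        then t + ((if (1 - asn.getD var 0) != 0 then (1 : Int) else 0)
                   - (if asn.getD var 0 != 0 then (1 : Int) else 0)) else t) 0
    = (List.filter (fun c => c.contains var) formula).foldl
      (fun t c => t + (pvEvalClauseA c (asn.insert var (1 - asn.getD var 0))
                        - pvEvalClauseA c asn)) 0 := by
    apply PySem.List.foldl_congr_mem
    intro t c hcmem
    have hvc : var ∈ c := by
      have := (List.mem_filter.mp hcmem).2
      simpa using this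
    exact pv_delta c asn var hvc t
  rw [hcong, PySem.List.foldl_add, hsc, pv_score_insert formula asn var (1 - asn.getD var 0)]
  ring

-- A's inner early-return loop, characterised as a first-match scan over the full list
theorem pv_genVarsA_find (formula : List (List String)) (m : Int) (asn : PySem.Dict String Int)
    (vars : List String) (acc : List (PySem.Dict String Int × Int)) :
    pvGenVarsA formula m asn vars acc =
      match (vars.map (fun var =>
          (asn.insert var (1 - asn.getD var 0),
           pvEvlfmlA formula (asn.insert var (1 - asn.getD var 0))))).find?
          (fun c => c.2 == m) with
      | some c => .inl c.1
      | none => .inr (acc ++ vars.map (fun var =>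
          (asn.insert var (1 - asn.getD var 0),
           pvEvlfmlA formula (asn.insert var (1 - asn.getD var 0))))) := by
  induction vars generalizing acc with
  | nil => simp [pvGenVarsA]
  | cons var rest ih =>
    simp only [pvGenVarsA, List.map_cons, List.find?_cons]
    by_cases he : pvEvlfmlA formula (asn.insert var (1 - asn.getD var 0)) = m
    · simp [he]
    · have hb : ((asn.insert var (1 - asn.getD var 0),
          pvEvlfmlA formula (asn.insert var (1 - asn.getD var 0))).2 == m) = false := by
        simpa using he
      simp only [he, if_false, hb, ih]
      cases (rest.map (fun var =>
          (asn.insert var (1 - asn.getD var 0),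
           pvEvlfmlA formula (asn.insert var (1 - asn.getD var 0))))).find? (fun c => c.2 == m) with
      | some c => rfl
      | none => simp

theorem pv_genVarsA_keys (formula : List (List String)) (m : Int) (asn : PySem.Dict String Int)
    (acc : List (PySem.Dict String Int × Int)) :
    pvGenVarsA formula m asn asn.keys acc =
      match (pvCandsOf formula asn).find? (fun c => c.2 == m) with
      | some c => .inl c.1
      | none => .inr (acc ++ pvCandsOf formula asn) := by
  rw [pv_genVarsA_find]; rfl

-- A's outer early-return loop, characterised over the flattened candidate list
theorem pv_genBeamA_find (formula : List (List String)) (m : Int)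
    (beam : List (PySem.Dict String Int × Int)) (acc : List (PySem.Dict String Int × Int)) :
    pvGenBeamA formula m beam acc =
      match (beam.flatMap (fun p => pvCandsOf formula p.1)).find? (fun c => c.2 == m) with
      | some c => .inl c.1
      | none => .inr (acc ++ beam.flatMap (fun p => pvCandsOf formula p.1)) := by
  induction beam generalizing acc with
  | nil => simp [pvGenBeamA]
  | cons hd rest ih =>
    obtain ⟨asn, sc⟩ := hd
    simp only [pvGenBeamA, List.flatMap_cons, List.find?_append]
    rw [pv_genVarsA_keys]
    cases hf : (pvCandsOf formula asn).find? (fun c => c.2 == m) with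
    | some c => simp
    | none =>
      simp only [Option.none_or]
      rw [ih]
      cases (rest.flatMap (fun p => pvCandsOf formula p.1)).find? (fun c => c.2 == m) with
      | some c => rfl
      | none => simp [List.append_assoc]

-- the per-entry invariant carried through the beam
def pvInv (formula : List (List String)) (dkeys : List String)
    (p : PySem.Dict String Int × Int) : Prop :=
  p.2 = pvEvlfmlA formula p.1 ∧ p.1.keys = dkeys

theorem pv_cands_inv (formula : List (List String)) (dkeys : List String)
    (beam : List (PySem.Dict String Int × Int)) (hk : ∀ p ∈ beam, p.1.keys = dkeys) :
    ∀ x ∈ beam.flatMap (fun p => pvCandsOf formula p.1), pvInv formula dkeys x := by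
  intro x hx
  obtain ⟨p, hp, hxp⟩ := List.mem_flatMap.mp hx
  obtain ⟨var, hvar, hxv⟩ := List.mem_map.mp hxp
  subst hxv
  have hcont : p.1.contains var = true := by
    rw [PySem.Dict.contains_eq_decide_mem_keys]
    simpa using hvar
  exact ⟨rfl, (PySem.Dict.keys_insert_of_contains p.1 _ hcont).trans (hk p hp)⟩

-- ---- A's loop as iteration of one deterministic step -------------------------
-- one iteration of A's while-loop body: hit (.inl (.inl na)), empty beam (.inl (.inr ())),
-- or the next beam
def pvStep (formula : List (List String)) (m bw : Int)
    (beam : List (PySem.Dict String Int × Int)) :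
    Sum (Sum (PySem.Dict String Int) Unit) (List (PySem.Dict String Int × Int)) :=
  match pvGenBeamA formula m beam [] with
  | .inl na => .inl (.inl na)
  | .inr candidates =>
    match PySem.List.slice (PySem.List.sorted candidates (fun x => x.2) true) none (some bw) with
    | [] => .inl (.inr ())
    | nb => .inr nb

theorem pvLoopA_succ (formula : List (List String)) (start : PySem.Dict String Int)
    (m bw : Int) (f : Nat) (beam : List (PySem.Dict String Int × Int)) (steps : Int) :
    pvLoopA formula start m bw (f + 1) beam steps =
      match pvStep formula m bw beam with
      | .inl (.inl na) => (na, steps + 1)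
      | .inl (.inr _) => (start, steps + 1)
      | .inr nb => pvLoopA formula start m bw f nb (steps + 1) := by
  simp only [pvLoopA, pvStep]
  cases pvGenBeamA formula m beam [] with
  | inl na => rfl
  | inr candidates =>
    cases hnb : PySem.List.slice (PySem.List.sorted candidates (fun x => x.2) true) none (some bw) with
    | nil => simp [hnb]
    | cons b bs => simp [hnb]

-- n iterations of pvStep (exits forwarded)
def pvRun (formula : List (List String)) (m bw : Int) :
    Nat → List (PySem.Dict String Int × Int) →
    Sum (Sum (PySem.Dict String Int) Unit) (List (PySem.Dict String Int × Int))
  | 0, beam => .inr beam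
  | n + 1, beam =>
    match pvStep formula m bw beam with
    | .inl e => .inl e
    | .inr nb => pvRun formula m bw n nb

theorem pvRun_compose (formula : List (List String)) (m bw : Int) (a b : Nat)
    (beam b' : List (PySem.Dict String Int × Int)) (h : pvRun formula m bw a beam = .inr b') :
    pvRun formula m bw (a + b) beam = pvRun formula m bw b b' := by
  induction a generalizing beam with
  | zero => cases h; rw [Nat.zero_add]
  | succ a ih =>
    rw [Nat.succ_add]
    simp only [pvRun] at h ⊢
    cases hs : pvStep formula m bw beam with
    | inl e => rw [hs] at h; cases h
    | inr nb => rw [hs] at h; exact ih nb h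

theorem pvRun_pump (formula : List (List String)) (m bw : Int)
    (c : Nat) (beam : List (PySem.Dict String Int × Int))
    (h : pvRun formula m bw c beam = .inr beam) (q : Nat) :
    pvRun formula m bw (q * c) beam = .inr beam := by
  induction q with
  | zero => simp [pvRun]
  | succ q ih =>
    have : (q + 1) * c = c + q * c := by ring
    rw [this, pvRun_compose formula m bw c (q * c) beam beam h]
    exact ih

theorem pvLoopA_shift (formula : List (List String)) (start : PySem.Dict String Int)
    (m bw : Int) (n : Nat) (f : Nat) (beam b' : List (PySem.Dict String Int × Int))
    (steps : Int) (h : pvRun formula m bw n beam = .inr b') :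
    pvLoopA formula start m bw (n + f) beam steps
      = pvLoopA formula start m bw f b' (steps + (n : Int)) := by
  induction n generalizing beam steps with
  | zero => cases h; simp
  | succ n ih =>
    rw [Nat.succ_add, pvLoopA_succ]
    simp only [pvRun] at h
    cases hs : pvStep formula m bw beam with
    | inl e => rw [hs] at h; cases h
    | inr nb =>
      rw [hs] at h
      exact (ih nb (steps + 1) h).trans (by congr 1; push_cast; ring)

-- pvStep, phrased over the flat candidate list (matches B's iteration shape)
theorem pvStep_cases (formula : List (List String)) (m bw : Int)
    (beam : List (PySem.Dict String Int × Int)) :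
    pvStep formula m bw beam =
      match (beam.flatMap (fun p => pvCandsOf formula p.1)).find? (fun c => c.2 == m) with
      | some c => .inl (.inl c.1)
      | none =>
        match PySem.List.slice (PySem.List.sorted
            (beam.flatMap (fun p => pvCandsOf formula p.1)) (fun x => x.2) true) none (some bw) with
        | [] => .inl (.inr ())
        | nb => .inr nb := by
  simp only [pvStep]
  rw [pv_genBeamA_find]
  cases (beam.flatMap (fun p => pvCandsOf formula p.1)).find? (fun c => c.2 == m) with
  | some c => rfl
  | none => simp

theorem pvKeyB_inj (b1 b2 : List (PySem.Dict String Int × Int))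
    (h : pvKeyB b1 = pvKeyB b2) : b1 = b2 := by
  have hinj : Function.Injective
      (fun p : PySem.Dict String Int × Int => (p.1.items, p.2)) := by
    intro p q hpq
    have h1 := congrArg Prod.fst hpq
    have h2 := congrArg Prod.snd hpq
    simp only at h1 h2
    exact Prod.ext (PySem.Dict.ext h1) h2
  exact List.map_injective_iff.mpr hinj h

-- the beam the anchor snapshot was taken at reaches the current beam without exiting
def pvAnchorInv (formula : List (List String)) (m bw : Int)
    (anchor : List ((List (String × Int)) × Int)) (anchor_step : Int)
    (beam : List (PySem.Dict String Int × Int)) (steps : Int) : Prop :=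
  ∃ ab, anchor = pvKeyB ab ∧ anchor_step ≤ steps ∧
    pvRun formula m bw (steps - anchor_step).toNat ab = .inr beam

theorem pv_loop_eq (formula : List (List String)) (start : PySem.Dict String Int)
    (m bw : Int) (hn : start.keys.Nodup) (fuel : Nat) :
    ∀ (beam : List (PySem.Dict String Int × Int)) (steps : Int)
      (anchor : List ((List (String × Int)) × Int)) (anchor_step span : Int),
      (∀ p ∈ beam, pvInv formula start.keys p) →
      pvAnchorInv formula m bw anchor anchor_step beam steps →
      pvLoopB (pvIndexB formula start.keys) start m bw fuel beam steps anchor anchor_step span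
        = pvLoopA formula start m bw fuel beam steps := by
  induction fuel using Nat.strong_induction_on with
  | _ fuel IH =>
  intro beam steps anchor anchor_step span hbeam hanch
  rw [pvLoopB.eq_def]
  by_cases h0 : fuel = 0
  · subst h0; simp [pvLoopA]
  · simp only [h0, dite_false]
    -- the fast-forward: amount skipped and its justification
    have hskip : ∀ sk : Int,
        sk = (if anchor_step < steps ∧ pvKeyB beam = anchor
          then PySem.Int.floordiv (fuel : Int) (steps - anchor_step) * (steps - anchor_step)
          else 0) →
        0 ≤ sk ∧ sk.toNat ≤ fuel ∧
          pvRun formula m bw sk.toNat beam = .inr beam ∧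
          pvLoopA formula start m bw fuel beam steps
            = pvLoopA formula start m bw (fuel - sk.toNat) beam (steps + sk) := by
      intro sk hsk
      by_cases hcond : anchor_step < steps ∧ pvKeyB beam = anchor
      · obtain ⟨hlt, hkey⟩ := hcond
        obtain ⟨ab, hab, _hle, hrun⟩ := hanch
        have hbe : ab = beam := pvKeyB_inj ab beam (by rw [← hab, hkey])
        rw [hbe] at hrun
        set cN : Nat := (steps - anchor_step).toNat with hcN
        have hc : (steps - anchor_step) = (cN : Int) := by omega
        have hsk' : sk = ((fuel / cN * cN : Nat) : Int) := by
          rw [hsk, if_pos ⟨hlt, hkey⟩, hc, PySem.Int.floordiv_natCast]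
          norm_cast
        have h1 : (0:Int) ≤ sk := by rw [hsk']; positivity
        have h2 : sk.toNat = fuel / cN * cN := by rw [hsk']; exact Int.toNat_natCast _
        have h3 : sk.toNat ≤ fuel := by rw [h2]; exact Nat.div_mul_le_self _ _
        have h4 : pvRun formula m bw sk.toNat beam = .inr beam := by
          rw [h2]
          exact pvRun_pump formula m bw cN beam hrun (fuel / cN)
        refine ⟨h1, h3, h4, ?_⟩
        have : fuel = sk.toNat + (fuel - sk.toNat) := by omega
        rw [this, pvLoopA_shift formula start m bw sk.toNat (fuel - sk.toNat) beam beam steps h4]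
        congr 2
        omega
      · rw [hsk, if_neg hcond]
        exact ⟨le_refl 0, by simp, rfl, by simp⟩
    obtain ⟨hge, hle, hrun0, hA⟩ := hskip _ rfl
    set sk : Int := (if anchor_step < steps ∧ pvKeyB beam = anchor
      then PySem.Int.floordiv (fuel : Int) (steps - anchor_step) * (steps - anchor_step)
      else 0) with hskdef
    rw [hA]
    set fuel' : Nat := fuel - sk.toNat with hf'
    set steps' : Int := steps + sk with hs'
    -- the anchor invariant still holds after the skip
    have hanch' : pvAnchorInv formula m bw anchor anchor_step beam steps' := by
      obtain ⟨ab, hab, hle2, hrun⟩ := hanch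
      have hbe : pvRun formula m bw ((steps - anchor_step).toNat + sk.toNat) ab = .inr beam :=
        (pvRun_compose formula m bw _ _ ab beam hrun).trans hrun0
      exact ⟨ab, hab, by omega, by
        have : (steps' - anchor_step).toNat = (steps - anchor_step).toNat + sk.toNat := by omega
        rw [this]; exact hbe⟩
    clear hanch hA hrun0 hskdef
    by_cases h1 : fuel' = 0
    · rw [h1]
      simp only [dite_true]
      simp [pvLoopA]
    · simp only [h1, dite_false]
      -- the (possibly updated) anchor still satisfies the invariant
      have hanch'' : ∀ a' : (List ((List (String × Int)) × Int)) × Int × Int,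
          a' = (if steps' - anchor_step = span then (pvKeyB beam, steps', 2 * span)
                else (anchor, anchor_step, span)) →
          pvAnchorInv formula m bw a'.1 a'.2.1 beam steps' := by
        intro a' ha'
        by_cases hu : steps' - anchor_step = span
        · rw [ha', if_pos hu]
          exact ⟨beam, rfl, le_refl _, by simp [pvRun]⟩
        · rw [ha', if_neg hu]
          exact hanch'
      obtain ⟨f', hf''⟩ : ∃ f', fuel' = f' + 1 := ⟨fuel' - 1, by omega⟩
      rw [hf'', pvLoopA_succ, pvStep_cases]
      have hflat : beam.flatMap (fun p => pvFlipsB (pvIndexB formula start.keys) p.1 p.2)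
          = beam.flatMap (fun p => pvCandsOf formula p.1) := by
        simp only [List.flatMap_def]
        congr 1
        apply List.map_congr_left
        intro p hp
        obtain ⟨hp1, hp2⟩ := hbeam p hp
        exact pv_flips_eq formula start.keys hn p.1 (hp2 ▸ hn) hp2 p.2 hp1
      rw [hflat]
      set C := beam.flatMap (fun p => pvCandsOf formula p.1) with hC
      have hstep : ∀ nb, pvStep formula m bw beam = .inr nb →
          pvRun formula m bw 1 beam = .inr nb := by
        intro nb hnb
        simp [pvRun, hnb]
      cases hfind : C.find? (fun c => c.2 == m) with
      | some c => rfl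
      | none =>
        cases hnb : PySem.List.slice (PySem.List.sorted C (fun x => x.2) true) none (some bw) with
        | nil => rfl
        | cons b bs =>
          -- the next beam satisfies both invariants; recurse
          have hcand : ∀ x ∈ C, pvInv formula start.keys x :=
            pv_cands_inv formula start.keys beam (fun p hp => (hbeam p hp).2)
          have hbeam2 : ∀ p ∈ b :: bs, pvInv formula start.keys p := by
            intro p hp
            rw [← hnb] at hp
            exact hcand p ((PySem.List.mem_sorted _ _ _ _).mp (PySem.List.mem_of_mem_slice _ _ _ hp))
          have hstep2 : pvStep formula m bw beam = .inr (b :: bs) := by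
            rw [pvStep_cases, ← hC, hfind, hnb]
          obtain ⟨ab, hab, hle2, hrun⟩ := hanch''
            (if steps' - anchor_step = span then (pvKeyB beam, steps', 2 * span)
             else (anchor, anchor_step, span)) rfl
          have hanch3 : pvAnchorInv formula m bw
              (if steps' - anchor_step = span then (pvKeyB beam, steps', 2 * span)
               else (anchor, anchor_step, span)).1
              (if steps' - anchor_step = span then (pvKeyB beam, steps', 2 * span)
               else (anchor, anchor_step, span)).2.1 (b :: bs) (steps' + 1) := by
            refine ⟨ab, hab, by omega, ?_⟩
            have harith : (steps' + 1 -
                (if steps' - anchor_step = span then (pvKeyB beam, steps', 2 * span)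
                 else (anchor, anchor_step, span)).2.1).toNat
              = (steps' -
                (if steps' - anchor_step = span then (pvKeyB beam, steps', 2 * span)
                 else (anchor, anchor_step, span)).2.1).toNat + 1 := by omega
            rw [harith, pvRun_compose formula m bw _ 1 ab beam hrun]
            exact hstep _ hstep2
          have hrec := IH f' (by omega) (b :: bs) (steps' + 1) _ _
            (if steps' - anchor_step = span then (pvKeyB beam, steps', 2 * span)
             else (anchor, anchor_step, span)).2.2 hbeam2 hanch3
          exact hrec

-- B's 0/1-count of true clauses is A's evlfml sum
theorem pv_startscore_eq (formula : List (List String)) (d : PySem.Dict String Int) :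
    ((formula.filter (fun c => pvTruthyB d c)).length : Int) = pvEvlfmlA formula d := by
  unfold pvEvlfmlA pvEvalClauseA pvTruthyB
  rw [← List.countP_eq_length_filter]
  exact (PySem.List.sum_map_ite_one_zero _ formula).symm

theorem pv_main (formula : List (List String)) (start_assignment : List (String × Int))
    (beam_width max_iters : Int) :
    beam_search formula start_assignment beam_width max_iters
      = beam_search_alt formula start_assignment beam_width max_iters := by
  unfold beam_search beam_search_alt
  simp only [pv_startscore_eq]
  by_cases h : pvEvlfmlA formula (PySem.Dict.ofList start_assignment) = (formula.length : Int)
  · simp [h]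
  · simp only [h, if_false]
    rw [pv_loop_eq formula (PySem.Dict.ofList start_assignment) (formula.length : Int) beam_width
      (PySem.Dict.nodup_keys_ofList start_assignment) max_iters.toNat
      [(PySem.Dict.ofList start_assignment, pvEvlfmlA formula (PySem.Dict.ofList start_assignment))]
      0 _ 0 1
      (by intro p hp; simp at hp; subst hp; exact ⟨rfl, rfl⟩)
      ⟨[(PySem.Dict.ofList start_assignment, pvEvlfmlA formula (PySem.Dict.ofList start_assignment))],
        rfl, le_refl 0, rfl⟩]

-- ===== VERDICT (by name: the statement is the Claim_ definition above) =====
theorem beam_search_spec : Claim_equal_beam_search := by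
  intro formula start_assignment beam_width max_iters _
  unfold Spec_beam_search
  exact pv_main formula start_assignment beam_width max_iters
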